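-- pv_equiv track=rewrite | github.com/RozhanMk/AI_Projects_SBU | hill_climbing_simple.py | get_attacks
-- ===== SOURCE A (Python) =====
-- def get_attacks(board):
--     attacks = 0
--     for i in range(0, 100):
--         for j in range(i+1 , 8):
--             if board[i] == board[j]:
--                 attacks += 1
--             if abs(board[i] - board[j]) == abs(i - j):
--                 attacks += 1
--     return attacks
-- ===== SOURCE B (Python) =====
-- def get_attacks(board):
--     cols = {}
--     diags = {}
--     antis = {}
--     attacks = 0
--     for k in range(8):
--         v = board[k]
--         attacks += cols.get(v, 0) + diags.get(v - k, 0) + antis.get(v + k, 0)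
--         cols[v] = cols.get(v, 0) + 1
--         diags[v - k] = diags.get(v - k, 0) + 1
--         antis[v + k] = antis.get(v + k, 0) + 1
--     return attacks
-- ===== Notes on version B (the rewrite author's own statement) =====
-- stated objective: alternative
-- what changed: Replaced the nested pairwise comparison loop (range(0,100) x range(i+1,8)) by a single pass over the 8 positions that maintains three hash-map counters (column, main diagonal, anti-diagonal) and adds, per position, the number of previously seen queens sharing a line.
import Mathlib
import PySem

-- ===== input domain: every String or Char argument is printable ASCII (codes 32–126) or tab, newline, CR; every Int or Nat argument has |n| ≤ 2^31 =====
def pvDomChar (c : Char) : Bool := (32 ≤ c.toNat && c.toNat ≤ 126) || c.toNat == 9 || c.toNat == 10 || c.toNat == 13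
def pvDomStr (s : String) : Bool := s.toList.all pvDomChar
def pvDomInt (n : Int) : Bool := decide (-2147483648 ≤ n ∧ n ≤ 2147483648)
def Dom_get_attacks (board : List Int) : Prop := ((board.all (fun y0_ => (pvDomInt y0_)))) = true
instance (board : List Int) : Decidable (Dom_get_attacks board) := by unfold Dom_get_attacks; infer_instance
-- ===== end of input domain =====

-- B replaces A's nested pairwise-comparison loops by a single pass over the 8 read positions that
-- maintains three counting dictionaries (column, main diagonal, anti-diagonal); objective: alternative algorithm.

-- ===== PORT A =====
-- A's pyGetD default 0 is never used under Pre_ (8 ≤ board.length): every index accessed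
-- satisfies 0 ≤ i < j < 8, in range; on shorter boards Python A raises IndexError (excluded by Pre_).
def get_attacks (board : List Int) : Int :=
  (PySem.List.pyRange 0 100 1).foldl (fun attacks i =>
    (PySem.List.pyRange (i+1) 8 1).foldl (fun attacks j =>
      let attacks := attacks + (if PySem.List.pyGetD board i 0 = PySem.List.pyGetD board j 0 then 1 else 0)
      attacks + (if |PySem.List.pyGetD board i 0 - PySem.List.pyGetD board j 0| = |i - j| then 1 else 0)) attacks) 0

-- ===== PORT B =====
-- state = (attacks, cols, diags, antis); the accessed index k is in range under Pre_, as in Python B (which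
-- raises IndexError on boards shorter than 8, exactly like A).
def get_attacks_alt (board : List Int) : Int :=
  ((PySem.List.pyRange 0 8 1).foldl
    (fun (st : Int × PySem.Dict Int Int × PySem.Dict Int Int × PySem.Dict Int Int) k =>
      (st.1 + st.2.1.getD (PySem.List.pyGetD board k 0) 0
            + st.2.2.1.getD (PySem.List.pyGetD board k 0 - k) 0
            + st.2.2.2.getD (PySem.List.pyGetD board k 0 + k) 0,
       st.2.1.insert (PySem.List.pyGetD board k 0) (st.2.1.getD (PySem.List.pyGetD board k 0) 0 + 1),
       st.2.2.1.insert (PySem.List.pyGetD board k 0 - k) (st.2.2.1.getD (PySem.List.pyGetD board k 0 - k) 0 + 1),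
       st.2.2.2.insert (PySem.List.pyGetD board k 0 + k) (st.2.2.2.getD (PySem.List.pyGetD board k 0 + k) 0 + 1)))
    (0, PySem.Dict.empty, PySem.Dict.empty, PySem.Dict.empty)).1

-- ===== PRECONDITION & SPEC =====
-- Python A reads the first eight entries and raises IndexError when the board is shorter than 8 (so does Python B);
-- Pre_ admits exactly the boards on which A returns.
def Pre_get_attacks (board : List Int) : Prop := 8 ≤ board.length
instance (board : List Int) : Decidable (Pre_get_attacks board) := by unfold Pre_get_attacks; infer_instance
def pvWitness_get_attacks : List Int := [0, 1, 2, 3, 4, 5, 6, 7]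
def Spec_get_attacks (board : List Int) (out : Int) : Prop := out = get_attacks_alt board
instance (board : List Int) (out : Int) : Decidable (Spec_get_attacks board out) := by unfold Spec_get_attacks; infer_instance

-- ===== CLAIM (what is proved, stated in full; the proofs are below) =====
def Claim_equal_get_attacks : Prop := ∀ (board : List Int), Dom_get_attacks board → Pre_get_attacks board → Spec_get_attacks board (get_attacks board)

-- ===== LEMMAS AND PROOFS =====
-- cnt v l = how many elements of l equal v (the value a counting dict holds for key v).
def cnt (v : Int) : List Int → Int
  | [] => 0
  | x :: xs => (if x = v then 1 else 0) + cnt v xs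

-- prs3 g p1 p2 p3 L: attacks B adds while processing indices L, when the three dicts currently
-- count the key lists p1/p2/p3 (column keys g k, diagonal keys g k - k, anti-diagonal keys g k + k).
def prs3 (g : Int → Int) : List Int → List Int → List Int → List Int → Int
  | _, _, _, [] => 0
  | p1, p2, p3, k :: L =>
      cnt (g k) p1 + cnt (g k - k) p2 + cnt (g k + k) p3 +
      prs3 g (p1 ++ [g k]) (p2 ++ [g k - k]) (p3 ++ [g k + k]) L

lemma cnt_append (v : Int) (p : List Int) (w : Int) :
    cnt v (p ++ [w]) = cnt v p + (if w = v then 1 else 0) := by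
  induction p with
  | nil => simp [cnt]
  | cons x xs ih => simp [cnt, ih]; ring

-- the loop invariant: if the three dicts count p1/p2/p3, B's fold adds exactly prs3 g p1 p2 p3 L.
lemma stream (board : List Int) (L : List Int) :
    ∀ (a : Int) (c1 c2 c3 : PySem.Dict Int Int) (p1 p2 p3 : List Int),
    (∀ v, c1.getD v 0 = cnt v p1) → (∀ v, c2.getD v 0 = cnt v p2) →
    (∀ v, c3.getD v 0 = cnt v p3) →
    (L.foldl
      (fun (st : Int × PySem.Dict Int Int × PySem.Dict Int Int × PySem.Dict Int Int) k =>
        (st.1 + st.2.1.getD (PySem.List.pyGetD board k 0) 0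
              + st.2.2.1.getD (PySem.List.pyGetD board k 0 - k) 0
              + st.2.2.2.getD (PySem.List.pyGetD board k 0 + k) 0,
         st.2.1.insert (PySem.List.pyGetD board k 0) (st.2.1.getD (PySem.List.pyGetD board k 0) 0 + 1),
         st.2.2.1.insert (PySem.List.pyGetD board k 0 - k) (st.2.2.1.getD (PySem.List.pyGetD board k 0 - k) 0 + 1),
         st.2.2.2.insert (PySem.List.pyGetD board k 0 + k) (st.2.2.2.getD (PySem.List.pyGetD board k 0 + k) 0 + 1)))
      (a, c1, c2, c3)).1
      = a + prs3 (fun k => PySem.List.pyGetD board k 0) p1 p2 p3 L := by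
  induction L with
  | nil => intro a c1 c2 c3 p1 p2 p3 h1 h2 h3; simp [prs3]
  | cons k L ih =>
    intro a c1 c2 c3 p1 p2 p3 h1 h2 h3
    rw [List.foldl_cons]
    rw [ih _ _ _ _ (p1 ++ [PySem.List.pyGetD board k 0])
        (p2 ++ [PySem.List.pyGetD board k 0 - k]) (p3 ++ [PySem.List.pyGetD board k 0 + k])
        ?_ ?_ ?_]
    · simp only [prs3, h1, h2, h3]; ring
    · intro v; rw [PySem.Dict.getD_insert, cnt_append, h1]
      by_cases h : v = PySem.List.pyGetD board k 0
      · simp [h]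
      · rw [if_neg h, if_neg (fun hh => h hh.symm), add_zero]; exact h1 v
    · intro v; rw [PySem.Dict.getD_insert, cnt_append, h2]
      by_cases h : v = PySem.List.pyGetD board k 0 - k
      · simp [h]
      · rw [if_neg h, if_neg (fun hh => h hh.symm), add_zero]; exact h2 v
    · intro v; rw [PySem.Dict.getD_insert, cnt_append, h3]
      by_cases h : v = PySem.List.pyGetD board k 0 + k
      · simp [h]
      · rw [if_neg h, if_neg (fun hh => h hh.symm), add_zero]; exact h3 v

lemma alt_eval (board : List Int) :
    get_attacks_alt board
      = prs3 (fun k => PySem.List.pyGetD board k 0) [] [] [] (PySem.List.pyRange 0 8 1) := by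
  unfold get_attacks_alt
  rw [stream board (PySem.List.pyRange 0 8 1) 0 _ _ _ [] [] []
      (by intro v; simp [PySem.Dict.getD_empty, cnt])
      (by intro v; simp [PySem.Dict.getD_empty, cnt])
      (by intro v; simp [PySem.Dict.getD_empty, cnt])]
  ring

lemma foldl_id (f : Int → Int → Int) : ∀ (L : List Int) (x : Int), (∀ i ∈ L, ∀ a, f a i = a) → L.foldl f x = x := by
  intro L
  induction L with
  | nil => simp
  | cons y ys ih => intro x h; rw [List.foldl_cons, h y (by simp), ih x (fun i hi a => h i (by simp [hi]) a)]

set_option maxRecDepth 4000 in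
lemma pv_main (b0 b1 b2 b3 b4 b5 b6 b7 : Int) (t : List Int) :
    get_attacks (b0::b1::b2::b3::b4::b5::b6::b7::t)
      = get_attacks_alt (b0::b1::b2::b3::b4::b5::b6::b7::t) := by
  rw [alt_eval]
  unfold get_attacks
  rw [PySem.List.pyRange_one_append 0 8 100 (by norm_num) (by norm_num), List.foldl_append]
  rw [foldl_id _ (PySem.List.pyRange 8 100 1) _ (by
    intro i hi a
    rw [PySem.List.mem_pyRange_one] at hi
    rw [PySem.List.pyRange_one_eq_nil (by omega), List.foldl_nil])]
  have h8 : PySem.List.pyRange 0 8 1 = [0,1,2,3,4,5,6,7] := by decide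
  have r1 : PySem.List.pyRange (0+1) 8 1 = [1,2,3,4,5,6,7] := by decide
  have r2 : PySem.List.pyRange (1+1) 8 1 = [2,3,4,5,6,7] := by decide
  have r3 : PySem.List.pyRange (2+1) 8 1 = [3,4,5,6,7] := by decide
  have r4 : PySem.List.pyRange (3+1) 8 1 = [4,5,6,7] := by decide
  have r5 : PySem.List.pyRange (4+1) 8 1 = [5,6,7] := by decide
  have r6 : PySem.List.pyRange (5+1) 8 1 = [6,7] := by decide
  have r7 : PySem.List.pyRange (6+1) 8 1 = [7] := by decide
  have r8 : PySem.List.pyRange (7+1) 8 1 = ([] : List Int) := by decide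
  rw [h8]
  simp only [List.foldl_cons, List.foldl_nil, r1, r2, r3, r4, r5, r6, r7, r8]
  norm_num [prs3, cnt, PySem.List.pyGetD_ofNat', List.getD]
  have e01 : (if |b0 - b1| = 1 then (1:Int) else 0) = ((if b0 = b1 - 1 then (1:Int) else 0) + if b0 = b1 + 1 then (1:Int) else 0) := by
    rcases abs_cases (b0 - b1) with ⟨h, _⟩ | ⟨h, _⟩ <;> rw [h] <;> split_ifs <;> omega
  have e02 : (if |b0 - b2| = 2 then (1:Int) else 0) = ((if b0 = b2 - 2 then (1:Int) else 0) + if b0 = b2 + 2 then (1:Int) else 0) := by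
    rcases abs_cases (b0 - b2) with ⟨h, _⟩ | ⟨h, _⟩ <;> rw [h] <;> split_ifs <;> omega
  have e03 : (if |b0 - b3| = 3 then (1:Int) else 0) = ((if b0 = b3 - 3 then (1:Int) else 0) + if b0 = b3 + 3 then (1:Int) else 0) := by
    rcases abs_cases (b0 - b3) with ⟨h, _⟩ | ⟨h, _⟩ <;> rw [h] <;> split_ifs <;> omega
  have e04 : (if |b0 - b4| = 4 then (1:Int) else 0) = ((if b0 = b4 - 4 then (1:Int) else 0) + if b0 = b4 + 4 then (1:Int) else 0) := by
    rcases abs_cases (b0 - b4) with ⟨h, _⟩ | ⟨h, _⟩ <;> rw [h] <;> split_ifs <;> omega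
  have e05 : (if |b0 - b5| = 5 then (1:Int) else 0) = ((if b0 = b5 - 5 then (1:Int) else 0) + if b0 = b5 + 5 then (1:Int) else 0) := by
    rcases abs_cases (b0 - b5) with ⟨h, _⟩ | ⟨h, _⟩ <;> rw [h] <;> split_ifs <;> omega
  have e06 : (if |b0 - b6| = 6 then (1:Int) else 0) = ((if b0 = b6 - 6 then (1:Int) else 0) + if b0 = b6 + 6 then (1:Int) else 0) := by
    rcases abs_cases (b0 - b6) with ⟨h, _⟩ | ⟨h, _⟩ <;> rw [h] <;> split_ifs <;> omega
  have e07 : (if |b0 - b7| = 7 then (1:Int) else 0) = ((if b0 = b7 - 7 then (1:Int) else 0) + if b0 = b7 + 7 then (1:Int) else 0) := by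
    rcases abs_cases (b0 - b7) with ⟨h, _⟩ | ⟨h, _⟩ <;> rw [h] <;> split_ifs <;> omega
  have e12 : (if |b1 - b2| = 1 then (1:Int) else 0) = ((if b1 - 1 = b2 - 2 then (1:Int) else 0) + if b1 + 1 = b2 + 2 then (1:Int) else 0) := by
    rcases abs_cases (b1 - b2) with ⟨h, _⟩ | ⟨h, _⟩ <;> rw [h] <;> split_ifs <;> omega
  have e13 : (if |b1 - b3| = 2 then (1:Int) else 0) = ((if b1 - 1 = b3 - 3 then (1:Int) else 0) + if b1 + 1 = b3 + 3 then (1:Int) else 0) := by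
    rcases abs_cases (b1 - b3) with ⟨h, _⟩ | ⟨h, _⟩ <;> rw [h] <;> split_ifs <;> omega
  have e14 : (if |b1 - b4| = 3 then (1:Int) else 0) = ((if b1 - 1 = b4 - 4 then (1:Int) else 0) + if b1 + 1 = b4 + 4 then (1:Int) else 0) := by
    rcases abs_cases (b1 - b4) with ⟨h, _⟩ | ⟨h, _⟩ <;> rw [h] <;> split_ifs <;> omega
  have e15 : (if |b1 - b5| = 4 then (1:Int) else 0) = ((if b1 - 1 = b5 - 5 then (1:Int) else 0) + if b1 + 1 = b5 + 5 then (1:Int) else 0) := by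
    rcases abs_cases (b1 - b5) with ⟨h, _⟩ | ⟨h, _⟩ <;> rw [h] <;> split_ifs <;> omega
  have e16 : (if |b1 - b6| = 5 then (1:Int) else 0) = ((if b1 - 1 = b6 - 6 then (1:Int) else 0) + if b1 + 1 = b6 + 6 then (1:Int) else 0) := by
    rcases abs_cases (b1 - b6) with ⟨h, _⟩ | ⟨h, _⟩ <;> rw [h] <;> split_ifs <;> omega
  have e17 : (if |b1 - b7| = 6 then (1:Int) else 0) = ((if b1 - 1 = b7 - 7 then (1:Int) else 0) + if b1 + 1 = b7 + 7 then (1:Int) else 0) := by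
    rcases abs_cases (b1 - b7) with ⟨h, _⟩ | ⟨h, _⟩ <;> rw [h] <;> split_ifs <;> omega
  have e23 : (if |b2 - b3| = 1 then (1:Int) else 0) = ((if b2 - 2 = b3 - 3 then (1:Int) else 0) + if b2 + 2 = b3 + 3 then (1:Int) else 0) := by
    rcases abs_cases (b2 - b3) with ⟨h, _⟩ | ⟨h, _⟩ <;> rw [h] <;> split_ifs <;> omega
  have e24 : (if |b2 - b4| = 2 then (1:Int) else 0) = ((if b2 - 2 = b4 - 4 then (1:Int) else 0) + if b2 + 2 = b4 + 4 then (1:Int) else 0) := by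
    rcases abs_cases (b2 - b4) with ⟨h, _⟩ | ⟨h, _⟩ <;> rw [h] <;> split_ifs <;> omega
  have e25 : (if |b2 - b5| = 3 then (1:Int) else 0) = ((if b2 - 2 = b5 - 5 then (1:Int) else 0) + if b2 + 2 = b5 + 5 then (1:Int) else 0) := by
    rcases abs_cases (b2 - b5) with ⟨h, _⟩ | ⟨h, _⟩ <;> rw [h] <;> split_ifs <;> omega
  have e26 : (if |b2 - b6| = 4 then (1:Int) else 0) = ((if b2 - 2 = b6 - 6 then (1:Int) else 0) + if b2 + 2 = b6 + 6 then (1:Int) else 0) := by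
    rcases abs_cases (b2 - b6) with ⟨h, _⟩ | ⟨h, _⟩ <;> rw [h] <;> split_ifs <;> omega
  have e27 : (if |b2 - b7| = 5 then (1:Int) else 0) = ((if b2 - 2 = b7 - 7 then (1:Int) else 0) + if b2 + 2 = b7 + 7 then (1:Int) else 0) := by
    rcases abs_cases (b2 - b7) with ⟨h, _⟩ | ⟨h, _⟩ <;> rw [h] <;> split_ifs <;> omega
  have e34 : (if |b3 - b4| = 1 then (1:Int) else 0) = ((if b3 - 3 = b4 - 4 then (1:Int) else 0) + if b3 + 3 = b4 + 4 then (1:Int) else 0) := by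
    rcases abs_cases (b3 - b4) with ⟨h, _⟩ | ⟨h, _⟩ <;> rw [h] <;> split_ifs <;> omega
  have e35 : (if |b3 - b5| = 2 then (1:Int) else 0) = ((if b3 - 3 = b5 - 5 then (1:Int) else 0) + if b3 + 3 = b5 + 5 then (1:Int) else 0) := by
    rcases abs_cases (b3 - b5) with ⟨h, _⟩ | ⟨h, _⟩ <;> rw [h] <;> split_ifs <;> omega
  have e36 : (if |b3 - b6| = 3 then (1:Int) else 0) = ((if b3 - 3 = b6 - 6 then (1:Int) else 0) + if b3 + 3 = b6 + 6 then (1:Int) else 0) := by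
    rcases abs_cases (b3 - b6) with ⟨h, _⟩ | ⟨h, _⟩ <;> rw [h] <;> split_ifs <;> omega
  have e37 : (if |b3 - b7| = 4 then (1:Int) else 0) = ((if b3 - 3 = b7 - 7 then (1:Int) else 0) + if b3 + 3 = b7 + 7 then (1:Int) else 0) := by
    rcases abs_cases (b3 - b7) with ⟨h, _⟩ | ⟨h, _⟩ <;> rw [h] <;> split_ifs <;> omega
  have e45 : (if |b4 - b5| = 1 then (1:Int) else 0) = ((if b4 - 4 = b5 - 5 then (1:Int) else 0) + if b4 + 4 = b5 + 5 then (1:Int) else 0) := by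
    rcases abs_cases (b4 - b5) with ⟨h, _⟩ | ⟨h, _⟩ <;> rw [h] <;> split_ifs <;> omega
  have e46 : (if |b4 - b6| = 2 then (1:Int) else 0) = ((if b4 - 4 = b6 - 6 then (1:Int) else 0) + if b4 + 4 = b6 + 6 then (1:Int) else 0) := by
    rcases abs_cases (b4 - b6) with ⟨h, _⟩ | ⟨h, _⟩ <;> rw [h] <;> split_ifs <;> omega
  have e47 : (if |b4 - b7| = 3 then (1:Int) else 0) = ((if b4 - 4 = b7 - 7 then (1:Int) else 0) + if b4 + 4 = b7 + 7 then (1:Int) else 0) := by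
    rcases abs_cases (b4 - b7) with ⟨h, _⟩ | ⟨h, _⟩ <;> rw [h] <;> split_ifs <;> omega
  have e56 : (if |b5 - b6| = 1 then (1:Int) else 0) = ((if b5 - 5 = b6 - 6 then (1:Int) else 0) + if b5 + 5 = b6 + 6 then (1:Int) else 0) := by
    rcases abs_cases (b5 - b6) with ⟨h, _⟩ | ⟨h, _⟩ <;> rw [h] <;> split_ifs <;> omega
  have e57 : (if |b5 - b7| = 2 then (1:Int) else 0) = ((if b5 - 5 = b7 - 7 then (1:Int) else 0) + if b5 + 5 = b7 + 7 then (1:Int) else 0) := by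
    rcases abs_cases (b5 - b7) with ⟨h, _⟩ | ⟨h, _⟩ <;> rw [h] <;> split_ifs <;> omega
  have e67 : (if |b6 - b7| = 1 then (1:Int) else 0) = ((if b6 - 6 = b7 - 7 then (1:Int) else 0) + if b6 + 6 = b7 + 7 then (1:Int) else 0) := by
    rcases abs_cases (b6 - b7) with ⟨h, _⟩ | ⟨h, _⟩ <;> rw [h] <;> split_ifs <;> omega
  rw [e01, e02, e03, e04, e05, e06, e07, e12, e13, e14, e15, e16, e17, e23, e24, e25, e26, e27, e34, e35, e36, e37, e45, e46, e47, e56, e57, e67]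
  ring

-- ===== VERDICT (by name: the statement is the Claim_ definition above) =====
theorem get_attacks_spec : Claim_equal_get_attacks := by
  intro board _ hpre
  unfold Pre_get_attacks at hpre
  unfold Spec_get_attacks
  rcases board with _ | ⟨b0, _ | ⟨b1, _ | ⟨b2, _ | ⟨b3, _ | ⟨b4, _ | ⟨b5, _ | ⟨b6, _ | ⟨b7, t⟩⟩⟩⟩⟩⟩⟩⟩ <;>
    simp only [List.length_nil, List.length_cons] at hpre <;>
    first
      | omega
      | exact pv_main b0 b1 b2 b3 b4 b5 b6 b7 t
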